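-- pv_equiv track=rewrite | github.com/malkiavec/Pick3pick4system | streamlit_app.py | greedy_multiset_mapping
-- ===== SOURCE A (Python) =====
-- from collections import Counter
-- from typing import List, Tuple, Dict
--
-- def greedy_multiset_mapping(a: Tuple[int, ...], b: Tuple[int, ...]):
--     ca, cb = Counter(a), Counter(b)
--     pairs = []
--     for d in range(10):
--         m = min(ca[d], cb[d])
--         for _ in range(m):
--             pairs.append((d, d))
--         ca[d] -= m
--         cb[d] -= m
--     for x in ca:
--         for _ in range(ca[x]):
--             for y in cb:
--                 if cb[y] > 0:
--                     pairs.append((x, y))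
--                     cb[y] -= 1
--                     break
--     return pairs
-- ===== SOURCE B (Python) =====
-- from collections import Counter
--
-- def greedy_multiset_mapping(a, b):
--     ca, cb = Counter(a), Counter(b)
--     pairs = []
--     for d in range(10):
--         m = min(ca[d], cb[d])
--         pairs += [(d, d)] * m
--         ca[d] -= m
--         cb[d] -= m
--     la = [x for x, c in ca.items() for _ in range(c)]
--     lb = [y for y, c in cb.items() for _ in range(c)]
--     return pairs + list(zip(la, lb))
-- ===== Notes on version B (the rewrite author's own statement) =====
-- stated objective: faster
-- what changed: The leftover phase no longer runs A's stateful nested scan (for each leftover occurrence, rescan cb's keys for the first positive count and decrement it); B expands both leftover counters into sequences in insertion order and zips them, which yields the same greedy pairing and its min-length truncation in one linear pass.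
import Mathlib
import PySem

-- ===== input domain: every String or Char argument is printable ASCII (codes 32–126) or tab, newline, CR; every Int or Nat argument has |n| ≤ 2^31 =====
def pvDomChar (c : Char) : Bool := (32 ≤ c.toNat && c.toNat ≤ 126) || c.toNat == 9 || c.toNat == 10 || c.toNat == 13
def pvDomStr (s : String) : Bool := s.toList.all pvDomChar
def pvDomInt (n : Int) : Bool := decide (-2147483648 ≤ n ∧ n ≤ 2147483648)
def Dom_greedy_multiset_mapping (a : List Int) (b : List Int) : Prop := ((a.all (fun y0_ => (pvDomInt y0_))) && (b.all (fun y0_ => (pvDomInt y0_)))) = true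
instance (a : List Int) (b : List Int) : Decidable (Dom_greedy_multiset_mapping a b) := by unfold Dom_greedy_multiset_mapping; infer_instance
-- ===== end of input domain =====

-- B replaces A's stateful nested scan of the leftover phase by expanding both leftover
-- counters into sequences (insertion order) and zipping them — an alternative decomposition.

-- ===== PORT A =====
-- phase 1 of A: for d in range(10): m = min(ca[d], cb[d]); for _ in range(m): pairs.append((d,d)); ca[d] -= m; cb[d] -= m
def gmmStep1A (st : List (Int × Int) × PySem.Dict Int Int × PySem.Dict Int Int) (d : Int) :
    List (Int × Int) × PySem.Dict Int Int × PySem.Dict Int Int :=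
  let m := min (st.2.1.getD d 0) (st.2.2.getD d 0)
  ((PySem.List.pyRange 0 m 1).foldl (fun ps _ => ps ++ [(d, d)]) st.1,
   st.2.1.insert d (st.2.1.getD d 0 - m),
   st.2.2.insert d (st.2.2.getD d 0 - m))

-- inner loop of A: for y in cb: if cb[y] > 0: pairs.append((x, y)); cb[y] -= 1; break
def gmmInnerA (x : Int) (st : List (Int × Int) × PySem.Dict Int Int) :
    List (Int × Int) × PySem.Dict Int Int :=
  match st.2.keys.find? (fun y => decide (0 < st.2.getD y 0)) with
  | some y => (st.1 ++ [(x, y)], st.2.insert y (st.2.getD y 0 - 1))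
  | none => st

def greedy_multiset_mapping (a : List Int) (b : List Int) : List (Int × Int) :=
  let st := (PySem.List.pyRange 0 10 1).foldl gmmStep1A ([], PySem.Dict.counter a, PySem.Dict.counter b)
  -- for x in ca: for _ in range(ca[x]): <inner loop>
  (st.2.1.keys.foldl
    (fun st2 x => (PySem.List.pyRange 0 (st.2.1.getD x 0) 1).foldl (fun s _ => gmmInnerA x s) st2)
    (st.1, st.2.2)).1

-- ===== PORT B =====
-- phase 1 of B: pairs += [(d, d)] * m; same counter decrements
def gmmStep1B (st : List (Int × Int) × PySem.Dict Int Int × PySem.Dict Int Int) (d : Int) :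
    List (Int × Int) × PySem.Dict Int Int × PySem.Dict Int Int :=
  let m := min (st.2.1.getD d 0) (st.2.2.getD d 0)
  (st.1 ++ List.replicate m.toNat (d, d),
   st.2.1.insert d (st.2.1.getD d 0 - m),
   st.2.2.insert d (st.2.2.getD d 0 - m))

def greedy_multiset_mapping_alt (a : List Int) (b : List Int) : List (Int × Int) :=
  let st := (PySem.List.pyRange 0 10 1).foldl gmmStep1B ([], PySem.Dict.counter a, PySem.Dict.counter b)
  -- la = [x for x, c in ca.items() for _ in range(c)]; lb likewise; pairs + list(zip(la, lb))
  let la := st.2.1.items.flatMap (fun p => List.replicate p.2.toNat p.1)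
  let lb := st.2.2.items.flatMap (fun p => List.replicate p.2.toNat p.1)
  st.1 ++ la.zip lb

-- ===== PRECONDITION & SPEC =====
def Spec_greedy_multiset_mapping (a : List Int) (b : List Int) (out : List (Int × Int)) : Prop := out = greedy_multiset_mapping_alt a b
instance (a : List Int) (b : List Int) (out : List (Int × Int)) : Decidable (Spec_greedy_multiset_mapping a b out) := by unfold Spec_greedy_multiset_mapping; infer_instance

-- ===== CLAIM (what is proved, stated in full; the proofs are below) =====
def Claim_equal_greedy_multiset_mapping : Prop := ∀ (a : List Int) (b : List Int), Dom_greedy_multiset_mapping a b → Spec_greedy_multiset_mapping a b (greedy_multiset_mapping a b)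

-- ===== LEMMAS AND PROOFS =====

-- leftover expansion of a counter, in insertion order
def gmmExpand (d : PySem.Dict Int Int) : List Int :=
  d.items.flatMap (fun p => List.replicate p.2.toNat p.1)

-- find? only looks at the predicate's values on the list's members
lemma gmm_find?_congr {alpha : Type} (p q : alpha → Bool) :
    ∀ l : List alpha, (∀ a ∈ l, p a = q a) → l.find? p = l.find? q := by
  intro l
  induction l with
  | nil => intro _; rfl
  | cons a l ih =>
    intro h
    rw [List.find?_cons, List.find?_cons, h a (List.mem_cons_self)]
    cases q a
    · exact ih (fun x hx => h x (List.mem_cons_of_mem _ hx))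
    · rfl

-- the two phase-1 step functions agree
lemma gmm_step1_eq (st : List (Int × Int) × PySem.Dict Int Int × PySem.Dict Int Int) (d : Int) :
    gmmStep1A st d = gmmStep1B st d := by
  unfold gmmStep1A gmmStep1B
  simp only [PySem.List.foldl_append_singleton_eq_map (fun _ => (d, d)), List.map_const',
    PySem.List.length_pyRange_one]
  simp

-- phase 1 (either port) keeps both counters' key lists duplicate-free
lemma gmm_phase1_nodup (r : List Int) :
    ∀ (st : List (Int × Int) × PySem.Dict Int Int × PySem.Dict Int Int),
      st.2.1.keys.Nodup → st.2.2.keys.Nodup →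
      (r.foldl gmmStep1B st).2.1.keys.Nodup ∧ (r.foldl gmmStep1B st).2.2.keys.Nodup := by
  induction r with
  | nil => intro st h1 h2; exact ⟨h1, h2⟩
  | cons d r ih =>
    intro st h1 h2
    exact ih _ (PySem.Dict.nodup_keys_insert _ _ _ h1) (PySem.Dict.nodup_keys_insert _ _ _ h2)

-- if the leftover expansion is empty, the inner scan finds no positive key
lemma gmm_find_none (d : PySem.Dict Int Int) (h : gmmExpand d = []) :
    d.keys.find? (fun y => decide (0 < d.getD y 0)) = none := by
  apply List.find?_eq_none.mpr
  intro y hy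
  cases hg : d.get? y with
  | none => exact absurd ((PySem.Dict.get?_eq_none_iff_not_mem_keys d y).mp hg) (by simp [hy])
  | some v =>
    have hmem : (y, v) ∈ d.items := PySem.Dict.mem_items_of_get?_eq_some d hg
    have hrep : List.replicate v.toNat y = ([] : List Int) := by
      have := List.flatMap_eq_nil_iff.mp h _ hmem
      simpa using this
    have hv : v.toNat = 0 := by simpa using congrArg List.length hrep
    have hgd : d.getD y 0 = v := by simp [PySem.Dict.getD_eq_get?_getD, hg]
    simp [hgd]
    omega

-- one greedy inner step, raw-list form: the first key with a positive count is the head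
-- of the expansion, and decrementing it drops exactly that head
lemma gmm_step (l : List (Int × Int)) (hnd : (l.map Prod.fst).Nodup) (y : Int) (rest : List Int)
    (he : l.flatMap (fun p => List.replicate p.2.toNat p.1) = y :: rest) :
    (PySem.Dict.mk l).keys.find? (fun z => decide (0 < (PySem.Dict.mk l).getD z 0)) = some y ∧
    gmmExpand ((PySem.Dict.mk l).insert y ((PySem.Dict.mk l).getD y 0 - 1)) = rest := by
  induction l generalizing y rest with
  | nil => simp at he
  | cons p t ih =>
    obtain ⟨k, c⟩ := p
    simp only [List.map_cons, List.nodup_cons] at hnd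
    obtain ⟨hk, hndt⟩ := hnd
    by_cases hc : 0 < c
    · -- head entry has a positive count: it is matched and decremented
      obtain ⟨n, hn⟩ : ∃ n, c.toNat = n + 1 := ⟨c.toNat - 1, by omega⟩
      rw [List.flatMap_cons, hn, List.replicate_succ, List.cons_append, List.cons_eq_cons] at he
      obtain ⟨rfl, hr⟩ := he
      have hgd : (PySem.Dict.mk ((k, c) :: t)).getD k 0 = c := by
        simp [PySem.Dict.getD_eq_get?_getD, PySem.Dict.get?_mk_cons]
      constructor
      · rw [PySem.Dict.keys_mk, List.map_cons]
        apply List.find?_cons_of_pos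
        simp only [decide_eq_true_eq]
        rw [hgd]
        exact hc
      · have hcont : (PySem.Dict.mk ((k, c) :: t)).contains k = true := by
          apply (PySem.Dict.contains_iff_mem_keys _ _).mpr
          rw [PySem.Dict.keys_mk, List.map_cons]
          exact List.mem_cons_self
        have hmapt : t.map (fun q => if (q.1 == k) = true then (k, c - 1) else q) = t := by
          conv_rhs => rw [← List.map_id t]
          apply List.map_congr_left
          intro q hq
          have hqk : q.1 ≠ k := fun h1 => hk (h1 ▸ List.mem_map_of_mem hq)
          simp [hqk]
        simp only [gmmExpand]
        rw [hgd, PySem.Dict.items_insert_of_contains _ _ hcont]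
        have hitems : ({ items := (k, c) :: t } : PySem.Dict Int Int).items = (k, c) :: t := rfl
        rw [hitems, List.map_cons, List.flatMap_cons, hmapt]
        have hif : (if (((k, c).1 : Int) == k) = true then ((k, c - 1) : Int × Int) else (k, c))
            = (k, c - 1) := by simp
        rw [hif, ← hr]
        congr 1
        show List.replicate (c - 1).toNat k = List.replicate n k
        rw [show (c - 1).toNat = n from by omega]
    · -- head entry exhausted: recurse into the tail
      have hrep0 : List.replicate c.toNat k = ([] : List Int) := by
        have : c.toNat = 0 := by omega
        simp [this]
      rw [List.flatMap_cons] at he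
      rw [show List.replicate ((k, c) : Int × Int).2.toNat ((k, c) : Int × Int).1
          = List.replicate c.toNat k from rfl, hrep0, List.nil_append] at he
      obtain ⟨ihf, ihe⟩ := ih hndt y rest he
      have hymem : y ∈ t.map Prod.fst := by
        have := List.mem_of_find?_eq_some ihf
        simpa [PySem.Dict.keys_mk] using this
      have hyk : k ≠ y := fun h1 => hk (h1 ▸ hymem)
      have hgd_agree : ∀ z ∈ t.map Prod.fst,
          (PySem.Dict.mk ((k, c) :: t)).getD z 0 = (PySem.Dict.mk t).getD z 0 := by
        intro z hz
        have hkz : k ≠ z := fun h1 => hk (h1 ▸ hz)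
        simp [PySem.Dict.getD_eq_get?_getD, PySem.Dict.get?_mk_cons, hkz]
      have hgdk : (PySem.Dict.mk ((k, c) :: t)).getD k 0 = c := by
        simp [PySem.Dict.getD_eq_get?_getD, PySem.Dict.get?_mk_cons]
      constructor
      · rw [PySem.Dict.keys_mk, List.map_cons]
        rw [List.find?_cons_of_neg]
        · calc (t.map (fun x => x.1)).find?
                (fun z => decide (0 < (PySem.Dict.mk ((k, c) :: t)).getD z 0))
              = (t.map (fun x => x.1)).find?
                (fun z => decide (0 < (PySem.Dict.mk t).getD z 0)) := by
                apply gmm_find?_congr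
                intro z hz
                rw [hgd_agree z hz]
            _ = some y := by rw [← PySem.Dict.keys_mk t]; exact ihf
        · simp only [decide_eq_true_eq]
          rw [hgdk]
          omega
      · have hgy : (PySem.Dict.mk ((k, c) :: t)).getD y 0 = (PySem.Dict.mk t).getD y 0 :=
          hgd_agree y hymem
        have hconty : (PySem.Dict.mk ((k, c) :: t)).contains y = true := by
          apply (PySem.Dict.contains_iff_mem_keys _ _).mpr
          rw [PySem.Dict.keys_mk, List.map_cons]
          exact List.mem_cons_of_mem _ hymem
        have hcontyt : (PySem.Dict.mk t).contains y = true := by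
          apply (PySem.Dict.contains_iff_mem_keys _ _).mpr
          rw [PySem.Dict.keys_mk]
          exact hymem
        simp only [gmmExpand]
        rw [hgy, PySem.Dict.items_insert_of_contains _ _ hconty]
        simp only [gmmExpand] at ihe
        rw [PySem.Dict.items_insert_of_contains _ _ hcontyt] at ihe
        have hitems : ({ items := (k, c) :: t } : PySem.Dict Int Int).items = (k, c) :: t := rfl
        rw [hitems, List.map_cons, List.flatMap_cons]
        have hif : (if (((k, c).1 : Int) == y) = true
              then ((y, (PySem.Dict.mk t).getD y 0 - 1) : Int × Int) else (k, c)) = (k, c) := by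
          simp [hyk]
        rw [hif]
        rw [show List.replicate ((k, c) : Int × Int).2.toNat ((k, c) : Int × Int).1
            = List.replicate c.toNat k from rfl, hrep0, List.nil_append]
        exact ihe

-- Dict-level wrapper for gmm_step
lemma gmm_step_dict (d : PySem.Dict Int Int) (hnd : d.keys.Nodup) (y : Int) (rest : List Int)
    (he : gmmExpand d = y :: rest) :
    d.keys.find? (fun z => decide (0 < d.getD z 0)) = some y ∧
    gmmExpand (d.insert y (d.getD y 0 - 1)) = rest := by
  obtain ⟨l⟩ := d
  exact gmm_step l (by simpa [PySem.Dict.keys_mk] using hnd) y rest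
    (by simpa [gmmExpand] using he)

-- the greedy leftover loop produces exactly the zip with the expansion of cb
lemma gmm_zip (la : List Int) :
    ∀ (ps : List (Int × Int)) (cb : PySem.Dict Int Int), cb.keys.Nodup →
      (la.foldl (fun s x => gmmInnerA x s) (ps, cb)).1 = ps ++ la.zip (gmmExpand cb) := by
  induction la with
  | nil => intro ps cb _; simp
  | cons x la ih =>
    intro ps cb hnd
    rw [List.foldl_cons]
    cases he : gmmExpand cb with
    | nil =>
      have hf := gmm_find_none cb he
      have hstep : gmmInnerA x (ps, cb) = (ps, cb) := by
        unfold gmmInnerA; rw [hf]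
      rw [hstep, ih ps cb hnd, he]
      simp
    | cons y rest =>
      obtain ⟨hf, hins⟩ := gmm_step_dict cb hnd y rest he
      have hstep : gmmInnerA x (ps, cb) = (ps ++ [(x, y)], cb.insert y (cb.getD y 0 - 1)) := by
        unfold gmmInnerA; rw [hf]
      rw [hstep, ih _ _ (PySem.Dict.nodup_keys_insert _ _ _ hnd), hins]
      simp

-- fold over a list ignoring its elements = fold over a same-length replicate
lemma gmm_foldl_const_replicate {σ α β : Type} (g : σ → β → σ) (x : β) (r : List α) :
    ∀ st, r.foldl (fun s _ => g s x) st = (List.replicate r.length x).foldl g st := by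
  induction r with
  | nil => intro st; rfl
  | cons _ r ih =>
    intro st
    simp only [List.foldl_cons, List.length_cons, List.replicate_succ]
    exact ih _

-- A's outer double loop over keys and counts = one fold over the expansion
lemma gmm_outer (ca : PySem.Dict Int Int) (h1 : ca.keys.Nodup)
    (st0 : List (Int × Int) × PySem.Dict Int Int) :
    ca.keys.foldl
        (fun st2 x => (PySem.List.pyRange 0 (ca.getD x 0) 1).foldl (fun s _ => gmmInnerA x s) st2)
        st0
      = (gmmExpand ca).foldl (fun s z => gmmInnerA z s) st0 := by
  simp only [gmmExpand]
  rw [PySem.Dict.items_eq_map_keys ca h1 0]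
  rw [show (ca.keys.map (fun k => (k, ca.getD k 0))).flatMap
        (fun p => List.replicate p.2.toNat p.1)
      = ca.keys.flatMap (fun k => List.replicate (ca.getD k 0).toNat k) from by
    rw [List.flatMap_map]]
  rw [List.foldl_flatMap]
  apply List.foldl_ext
  intro st x _
  rw [gmm_foldl_const_replicate (fun s z => gmmInnerA z s) x]
  congr 1
  rw [PySem.List.length_pyRange_one]
  simp

-- phase 2 of A on any phase-1 state = pairs ++ zip of the two expansions
lemma gmm_phase2_eq (st : List (Int × Int) × PySem.Dict Int Int × PySem.Dict Int Int)
    (h1 : st.2.1.keys.Nodup) (h2 : st.2.2.keys.Nodup) :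
    (st.2.1.keys.foldl
        (fun st2 x => (PySem.List.pyRange 0 (st.2.1.getD x 0) 1).foldl (fun s _ => gmmInnerA x s) st2)
        (st.1, st.2.2)).1
      = st.1 ++ (gmmExpand st.2.1).zip (gmmExpand st.2.2) := by
  rw [gmm_outer _ h1, gmm_zip _ _ _ h2]

-- ===== VERDICT (by name: the statement is the Claim_ definition above) =====
theorem greedy_multiset_mapping_spec : Claim_equal_greedy_multiset_mapping := by
  intro a b _
  unfold Spec_greedy_multiset_mapping greedy_multiset_mapping greedy_multiset_mapping_alt
  rw [List.foldl_ext gmmStep1A gmmStep1B _ (fun st d _ => gmm_step1_eq st d)]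
  obtain ⟨hnd1, hnd2⟩ := gmm_phase1_nodup (PySem.List.pyRange 0 10 1)
    ([], PySem.Dict.counter a, PySem.Dict.counter b)
    (PySem.Dict.nodup_keys_counter a)
    (PySem.Dict.nodup_keys_counter b)
  exact gmm_phase2_eq _ hnd1 hnd2
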